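-- pv_equiv track=rewrite | github.com/dzjxzyd/R-PeptideCutter | R-PeptideCutter_for_two_enzymes.py | Caricain
-- ===== SOURCE A (Python) =====
-- def Caricain(seq,seq_len):
--     cleavage=[]
--     for i in range(seq_len):
--         if i < seq_len-1:
--             if seq[i]== 'A' or seq[i] == 'V'or seq[i] == 'L'or seq[i] == 'I'or seq[i] == 'F'or seq[i] == 'Y' or seq[i] == 'W':
--                 if seq[i+1] == 'R' or seq[i+1] == 'L':
--                     cleavage.append(i+1)
--     return cleavage
-- ===== SOURCE B (Python) =====
-- def Caricain(seq, seq_len):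
--     s = seq[:max(seq_len, 0)]
--     pos = {}
--     for j, ch in enumerate(s):
--         pos.setdefault(ch, []).append(j)
--     return sorted(j for c in 'RL'
--                   for j in pos.get(c, [])
--                   if j >= 1 and s[j - 1] in 'AVLIFYW')
-- ===== Notes on version B (the rewrite author's own statement) =====
-- stated objective: alternative
-- what changed: B builds a char->positions index of the sequence once, then queries the positions of the two cleavage residues 'R' and 'L', filters each by the preceding residue and sorts the merged site list, instead of A's single position-by-position pair scan.
import Mathlib
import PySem

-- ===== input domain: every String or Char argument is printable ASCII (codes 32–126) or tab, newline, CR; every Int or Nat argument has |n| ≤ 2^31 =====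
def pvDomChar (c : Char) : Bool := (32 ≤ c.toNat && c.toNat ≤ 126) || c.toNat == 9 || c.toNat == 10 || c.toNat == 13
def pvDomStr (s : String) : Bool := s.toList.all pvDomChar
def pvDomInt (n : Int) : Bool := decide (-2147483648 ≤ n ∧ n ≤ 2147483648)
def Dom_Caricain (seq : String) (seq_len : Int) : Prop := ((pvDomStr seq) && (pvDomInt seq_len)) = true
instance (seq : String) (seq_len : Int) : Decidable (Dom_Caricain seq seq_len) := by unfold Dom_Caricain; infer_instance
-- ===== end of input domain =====

-- B replaces A's position-by-position pair scan by building a char->positions index once, querying the two cleavage residues 'R','L', filtering each position list by its preceding residue and sorting the merged sites (alternative algorithm; same result).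


-- ===== PORT A =====
def Caricain (seq : String) (seq_len : Int) : List Int :=
  (PySem.List.pyRange 0 seq_len 1).foldl
    (fun cleavage i =>
      if i < seq_len - 1 then
        if PySem.List.pyGetD seq.toList i ' ' == 'A' || PySem.List.pyGetD seq.toList i ' ' == 'V'
            || PySem.List.pyGetD seq.toList i ' ' == 'L' || PySem.List.pyGetD seq.toList i ' ' == 'I'
            || PySem.List.pyGetD seq.toList i ' ' == 'F' || PySem.List.pyGetD seq.toList i ' ' == 'Y'
            || PySem.List.pyGetD seq.toList i ' ' == 'W' then
          if PySem.List.pyGetD seq.toList (i+1) ' ' == 'R'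
              || PySem.List.pyGetD seq.toList (i+1) ' ' == 'L' then
            cleavage ++ [i + 1]
          else cleavage
        else cleavage
      else cleavage) []

-- ===== PORT B =====
-- Source B: s = seq[:max(seq_len, 0)]; pos = {}; for j, ch in enumerate(s): pos.setdefault(ch, []).append(j);
-- return sorted(j for c in 'RL' for j in pos.get(c, []) if j >= 1 and s[j-1] in 'AVLIFYW').
-- 'pos.setdefault(ch, []).append(j)' (in-place list append on the dict's value) is ported exactly as
-- Dict.modify ch [] (· ++ [j]), i.e. pos[ch] = pos.get(ch, []) + [j].
def Caricain_alt (seq : String) (seq_len : Int) : List Int :=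
  let s := PySem.List.slice seq.toList none (some (max seq_len 0))
  let pos := (PySem.List.enumerate s).foldl
      (fun d p => d.modify p.2 ([] : List Int) (· ++ [p.1])) PySem.Dict.empty
  PySem.List.sorted
    ((['R', 'L'] : List Char).flatMap (fun c =>
      (pos.getD c []).filter (fun j =>
        decide (1 ≤ j) &&
        decide (PySem.List.pyGetD s (j - 1) ' ' ∈ (['A','V','L','I','F','Y','W'] : List Char)))))
    (fun x => x) false

-- ===== PRECONDITION & SPEC =====
-- Pre_ holds exactly where the Python A returns: seq_len ≤ len(seq), or seq_len = len(seq)+1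
-- with the last residue outside the P1 set (then the overrunning index is never evaluated);
-- on all other inputs A raises IndexError.
def Pre_Caricain (seq : String) (seq_len : Int) : Prop :=
  seq_len ≤ (seq.toList.length : Int) ∨
    (seq_len = (seq.toList.length : Int) + 1 ∧
      seq.toList.getLast?.all (fun c => decide (c ∉ (['A','V','L','I','F','Y','W'] : List Char))) = true)
instance (seq : String) (seq_len : Int) : Decidable (Pre_Caricain seq seq_len) := by
  unfold Pre_Caricain; infer_instance
def pvWitness_Caricain : String × Int := ("GALRVLW", 7)
def Spec_Caricain (seq : String) (seq_len : Int) (out : List Int) : Prop := out = Caricain_alt seq seq_len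
instance (seq : String) (seq_len : Int) (out : List Int) : Decidable (Spec_Caricain seq seq_len out) := by unfold Spec_Caricain; infer_instance

-- ===== CLAIM (what is proved, stated in full; the proofs are below) =====
def Claim_equal_Caricain : Prop := ∀ (seq : String) (seq_len : Int), Dom_Caricain seq seq_len → Pre_Caricain seq seq_len → Spec_Caricain seq seq_len (Caricain seq seq_len)

-- ===== LEMMAS AND PROOFS =====

-- the per-position tests of A, as Bool predicates on a Nat index
def pvT1 (L : List Char) (k : Nat) : Bool :=
  PySem.List.pyGetD L (k:Int) ' ' == 'A' || PySem.List.pyGetD L (k:Int) ' ' == 'V'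
    || PySem.List.pyGetD L (k:Int) ' ' == 'L' || PySem.List.pyGetD L (k:Int) ' ' == 'I'
    || PySem.List.pyGetD L (k:Int) ' ' == 'F' || PySem.List.pyGetD L (k:Int) ' ' == 'Y'
    || PySem.List.pyGetD L (k:Int) ' ' == 'W'

def pvT2 (L : List Char) (k : Nat) : Bool :=
  PySem.List.pyGetD L ((k:Int)+1) ' ' == 'R' || PySem.List.pyGetD L ((k:Int)+1) ' ' == 'L'

-- B's per-site test at a Nat index j of the sliced sequence s
def pvC (s : List Char) (k : Nat) : Bool :=
  (decide (1 ≤ (k:Int))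
      && decide (PySem.List.pyGetD s ((k:Int) - 1) ' ' ∈ (['A','V','L','I','F','Y','W'] : List Char)))
    && (PySem.List.pyGetD s (k:Int) ' ' == 'R' || PySem.List.pyGetD s (k:Int) ' ' == 'L')

theorem pv_filter_singleton_false {α : Type} {P : α → Bool} {a : α} (h : P a = false) :
    List.filter P [a] = [] := by
  simp [List.filter, h]

-- the positions index: pos.get(c, []) is the in-order list of indices of c
theorem pvPos (s : List Char) (c : Char) :
    (((PySem.List.enumerate s).foldl
        (fun d p => d.modify p.2 ([] : List Int) (· ++ [p.1])) PySem.Dict.empty).getD c [])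
      = ((PySem.List.enumerate s).filter (fun p => p.2 == c)).map (·.1) := by
  have h1 : (PySem.List.enumerate s).foldl
        (fun d p => d.modify p.2 ([] : List Int) (· ++ [p.1])) PySem.Dict.empty
      = ((PySem.List.enumerate s).map Prod.swap).foldl
        (fun d p => d.modify p.1 ([] : List Int) (· ++ [p.2])) PySem.Dict.empty := by
    rw [List.foldl_map]
    simp only [Prod.fst_swap, Prod.snd_swap]
  rw [h1, PySem.Dict.getD_foldl_modify_append, PySem.Dict.getD_empty, List.nil_append,
      List.filter_map, List.map_map]
  simp only [Function.comp_def, Prod.fst_swap, Prod.snd_swap]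

-- merged disjoint filters are a permutation of the single filter
theorem pv_perm {α : Type} (P Q q : α → Bool) (hdisj : ∀ a, P a = true → Q a = false)
    (l : List α) :
    (l.filter (fun a => q a && (P a || Q a))).Perm
      (l.filter (fun a => q a && P a) ++ l.filter (fun a => q a && Q a)) := by
  induction l with
  | nil => simp
  | cons a t ih =>
    simp only [List.filter_cons]
    by_cases hP : P a = true
    · have hQ := hdisj a hP
      by_cases hq : q a = true
      · simpa [hP, hQ, hq] using ih.cons a
      · have hq' : q a = false := by simpa using hq
        simpa [hP, hQ, hq'] using ih
    · have hP' : P a = false := by simpa using hP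
      by_cases hQ : Q a = true
      · by_cases hq : q a = true
        · simp only [hP', hQ, hq, Bool.or_true, Bool.and_true, Bool.and_false, if_true]
          exact (ih.cons a).trans List.perm_middle.symm
        · have hq' : q a = false := by simpa using hq
          simpa [hP', hQ, hq'] using ih
      · have hQ' : Q a = false := by simpa using hQ
        simpa [hP', hQ'] using ih

-- A's fold in filter/map normal form over Nat indices (0 < n)
theorem pvA_norm (seq : String) (n : Int) (hn : 0 < n) :
    Caricain seq n =
      ((List.range (n.toNat - 1)).filter
        (fun k => pvT1 seq.toList k && pvT2 seq.toList k)).map (fun k : Nat => ((k : Int) + 1)) := by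
  unfold Caricain
  have hb : (fun (cleavage : List Int) (i : Int) =>
      if i < n - 1 then
        if PySem.List.pyGetD seq.toList i ' ' == 'A' || PySem.List.pyGetD seq.toList i ' ' == 'V'
            || PySem.List.pyGetD seq.toList i ' ' == 'L' || PySem.List.pyGetD seq.toList i ' ' == 'I'
            || PySem.List.pyGetD seq.toList i ' ' == 'F' || PySem.List.pyGetD seq.toList i ' ' == 'Y'
            || PySem.List.pyGetD seq.toList i ' ' == 'W' then
          if PySem.List.pyGetD seq.toList (i+1) ' ' == 'R'
              || PySem.List.pyGetD seq.toList (i+1) ' ' == 'L' then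
            cleavage ++ [i + 1]
          else cleavage
        else cleavage
      else cleavage)
      = (fun (cleavage : List Int) (i : Int) =>
          if (decide (i < n - 1)
              && (PySem.List.pyGetD seq.toList i ' ' == 'A' || PySem.List.pyGetD seq.toList i ' ' == 'V'
                  || PySem.List.pyGetD seq.toList i ' ' == 'L' || PySem.List.pyGetD seq.toList i ' ' == 'I'
                  || PySem.List.pyGetD seq.toList i ' ' == 'F' || PySem.List.pyGetD seq.toList i ' ' == 'Y'
                  || PySem.List.pyGetD seq.toList i ' ' == 'W')
              && (PySem.List.pyGetD seq.toList (i+1) ' ' == 'R'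
                  || PySem.List.pyGetD seq.toList (i+1) ' ' == 'L')) then
            cleavage ++ [i + 1]
          else cleavage) := by
    funext cleavage i
    by_cases h1 : i < n - 1
    · simp only [h1, if_true]
      split_ifs <;> simp_all
    · simp [h1]
  rw [hb, PySem.List.foldl_append_if, List.nil_append, PySem.List.pyRange_one 0 n,
      List.filter_map, List.map_map]
  simp only [sub_zero]
  have hmm : n.toNat = (n.toNat - 1) + 1 := by omega
  rw [hmm]
  simp only [Nat.add_sub_cancel]
  rw [List.range_succ, List.filter_append,
      pv_filter_singleton_false (a := n.toNat - 1) ?hfail, List.append_nil]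
  case hfail =>
    have h2 : ¬ (((n.toNat - 1 : Nat) : Int) < n - 1) := by omega
    simp [Function.comp, h2]
  have hcomp : ((fun i : Int => i + 1) ∘ fun k : Nat => (0:Int) + ↑k)
      = (fun k : Nat => ((k : Int) + 1)) := by
    funext k; simp
  rw [hcomp]
  apply congrArg
  apply List.filter_congr
  intro k hk
  have hk' : k < n.toNat - 1 := List.mem_range.mp hk
  have hlt : (k : Int) < n - 1 := by omega
  simp [Function.comp, pvT1, pvT2, hlt]

-- B in filter/map normal form: sorted index-query result = the in-order filtered index scan
theorem pvF (S : List Char) (c : Char) (q : Int → Bool) :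
    ((((PySem.List.enumerate S).filter (fun p => p.2 == c)).map (fun p => p.1)).filter q)
      = (PySem.List.pyRange 0 (PySem.List.len S) 1).filter
          (fun j => q j && (PySem.List.pyGetD S j ' ' == c)) := by
  simp only [PySem.List.enumerate_eq_map_pyRange S ' ', List.filter_map, List.map_map,
    List.filter_filter, Function.comp, PySem.List.len_eq]
  exact List.map_id _

theorem pvB_norm (seq : String) (n : Int) :
    Caricain_alt seq n =
      ((List.range (PySem.List.slice seq.toList none (some (max n 0))).length).filter
        (fun k => pvC (PySem.List.slice seq.toList none (some (max n 0))) k)).map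
        (fun k : Nat => (k : Int)) := by
  simp only [Caricain_alt]
  generalize PySem.List.slice seq.toList none (some (max n 0)) = S
  rw [List.flatMap_cons, List.flatMap_cons, List.flatMap_nil, List.append_nil,
      pvPos S 'R', pvPos S 'L', pvF, pvF]
  have hperm := pv_perm (fun j => PySem.List.pyGetD S j ' ' == 'R')
      (fun j => PySem.List.pyGetD S j ' ' == 'L')
      (fun j => decide (1 ≤ j)
        && decide (PySem.List.pyGetD S (j - 1) ' ' ∈ (['A','V','L','I','F','Y','W'] : List Char)))
      (fun a ha => by
        simp only [beq_iff_eq] at ha ⊢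
        rw [ha]; decide)
      (PySem.List.pyRange 0 (PySem.List.len S) 1)
  have hpair : ((PySem.List.pyRange 0 (PySem.List.len S) 1).filter
      (fun j => (decide (1 ≤ j)
          && decide (PySem.List.pyGetD S (j - 1) ' ' ∈ (['A','V','L','I','F','Y','W'] : List Char)))
        && (PySem.List.pyGetD S j ' ' == 'R' || PySem.List.pyGetD S j ' ' == 'L'))).Pairwise
      (fun a b => (fun x => x) a < (fun x => x) b) := by
    exact (PySem.List.pairwise_lt_pyRange_one 0 (PySem.List.len S)).filter _
  have hys : (PySem.List.pyRange 0 (PySem.List.len S) 1).filter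
      (fun j => (decide (1 ≤ j)
          && decide (PySem.List.pyGetD S (j - 1) ' ' ∈ (['A','V','L','I','F','Y','W'] : List Char)))
        && (PySem.List.pyGetD S j ' ' == 'R' || PySem.List.pyGetD S j ' ' == 'L'))
      = ((List.range S.length).filter (fun k => pvC S k)).map (fun k : Nat => (k : Int)) := by
    rw [PySem.List.pyRange_one 0, List.filter_map]
    simp [pvC, Function.comp_def]
  exact (PySem.List.sorted_eq_of_perm_of_pairwise_lt _ _ _ hperm hpair).trans hys

-- pvC at index 0 is false (the j >= 1 guard)
theorem pvC_zero (s : List Char) : pvC s 0 = false := by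
  simp [pvC]

-- shift the B-side scan by one
theorem pv_shift (s : List Char) (m : Nat) (hm : 0 < m) :
    ((List.range m).filter (fun k => pvC s k)).map (fun k : Nat => (k : Int))
      = ((List.range (m - 1)).filter (fun k => pvC s (k + 1))).map
          (fun k : Nat => ((k : Int) + 1)) := by
  obtain ⟨m', rfl⟩ : ∃ m', m = m' + 1 := ⟨m - 1, by omega⟩
  rw [List.range_succ_eq_map, List.filter_cons, pvC_zero]
  simp only [Nat.add_sub_cancel, Bool.false_eq_true, if_false]
  rw [List.filter_map, List.map_map]
  simp [Function.comp_def, Nat.succ_eq_add_one]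

-- the two per-index tests agree at an in-range pair index
theorem pv_pred_eq (L : List Char) (m k : Nat) (hm : m ≤ L.length) (hk : k + 1 < m) :
    pvC (L.take m) (k + 1) = (pvT1 L k && pvT2 L k) := by
  have hkL : k < L.length := by omega
  have hk1L : k + 1 < L.length := by omega
  have hkt : k < (L.take m).length := by rw [List.length_take]; omega
  have hk1t : k + 1 < (L.take m).length := by rw [List.length_take]; omega
  have hc1 : ((k + 1 : Nat) : Int) - 1 = ((k : Nat) : Int) := by push_cast; ring
  have hp0 : PySem.List.pyGetD (L.take m) ((k : Nat) : Int) ' ' = L[k] := by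
    rw [PySem.List.pyGetD_natCast, List.getD_eq_getElem _ _ hkt, List.getElem_take]
  have hp1 : PySem.List.pyGetD (L.take m) ((k + 1 : Nat) : Int) ' ' = L[k+1] := by
    rw [PySem.List.pyGetD_natCast, List.getD_eq_getElem _ _ hk1t, List.getElem_take]
  have hq0 : PySem.List.pyGetD L ((k : Nat) : Int) ' ' = L[k] := by
    rw [PySem.List.pyGetD_natCast]; exact List.getD_eq_getElem _ _ hkL
  have hq1 : PySem.List.pyGetD L (((k : Nat) : Int) + 1) ' ' = L[k+1] := by
    have hc : ((k : Nat) : Int) + 1 = ((k + 1 : Nat) : Int) := by push_cast; ring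
    rw [hc, PySem.List.pyGetD_natCast]; exact List.getD_eq_getElem _ _ hk1L
  unfold pvC pvT1 pvT2
  rw [hc1, hp0, hp1, hq0, hq1]
  rw [Bool.eq_iff_iff]
  simp only [Bool.and_eq_true, Bool.or_eq_true, beq_iff_eq, decide_eq_true_eq,
    List.mem_cons, List.not_mem_nil, or_false, Nat.cast_add, Nat.cast_one]
  constructor
  · rintro ⟨⟨-, h1⟩, h2⟩; tauto
  · rintro ⟨h1, h2⟩
    refine ⟨⟨by omega, ?_⟩, ?_⟩ <;> tauto

-- ===== VERDICT (by name: the statement is the Claim_ definition above) =====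
theorem Caricain_spec : Claim_equal_Caricain := by
  intro seq n _ hpre
  unfold Spec_Caricain
  rw [pvB_norm]
  by_cases hn : n ≤ 0
  · have hA : Caricain seq n = [] := by
      unfold Caricain
      rw [PySem.List.pyRange_one_eq_nil (by omega)]
      rfl
    have hmax : max n 0 = 0 := by omega
    rw [hA, hmax, PySem.List.slice_to seq.toList (by omega : (0:Int) ≤ 0)]
    simp
  · have hn' : 0 < n := by omega
    rw [pvA_norm seq n hn']
    have hmax : max n 0 = n := by omega
    rw [hmax]
    rcases hpre with hle | ⟨heq, hlastp⟩
    · -- seq_len ≤ len(seq): both scan positions 1 .. seq_len-1 of the same prefix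
      have hs : PySem.List.slice seq.toList none (some n) = seq.toList.take n.toNat :=
        PySem.List.slice_to seq.toList (by omega)
      have hlen : (seq.toList.take n.toNat).length = n.toNat := by
        rw [List.length_take]; omega
      rw [hs, hlen, pv_shift _ _ (by omega)]
      apply congrArg
      apply List.filter_congr
      intro k hk
      exact (pv_pred_eq seq.toList n.toNat k (by omega)
        (by have := List.mem_range.mp hk; omega)).symm
    · -- seq_len = len(seq)+1 and the last residue is outside the P1 set:
      -- A also tests the pair starting at the last residue, but its first test fails there
      have hs : PySem.List.slice seq.toList none (some n) = seq.toList := by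
        rw [PySem.List.slice_to seq.toList (by omega)]
        exact List.take_of_length_le (by omega)
      rw [hs]
      rcases Nat.eq_zero_or_pos seq.toList.length with h0 | hpos
      · have hnil : seq.toList = [] := List.eq_nil_of_length_eq_zero h0
        have hone : n.toNat - 1 = 0 := by omega
        rw [hone, hnil]
        simp
      · rw [pv_shift _ _ hpos]
        have hmm : n.toNat - 1 = (seq.toList.length - 1) + 1 := by omega
        -- the last residue fails A's first test
        have hlt : seq.toList.length - 1 < seq.toList.length := by omega
        have hgl : seq.toList.getLast? = some (seq.toList[seq.toList.length - 1]'hlt) := by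
          rw [List.getLast?_eq_getElem?, List.getElem?_eq_getElem hlt]
        rw [hgl, Option.all_some, decide_eq_true_eq] at hlastp
        have hne := hlastp
        simp only [List.mem_cons, List.not_mem_nil, or_false, not_or] at hne
        obtain ⟨a1, a2, a3, a4, a5, a6, a7⟩ := hne
        have hp1 : PySem.List.pyGetD seq.toList ((seq.toList.length - 1 : Nat) : Int) ' '
            = seq.toList[seq.toList.length - 1]'hlt := by
          rw [PySem.List.pyGetD_natCast]
          exact List.getD_eq_getElem _ _ hlt
        have hT1 : pvT1 seq.toList (seq.toList.length - 1) = false := by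
          unfold pvT1
          rw [hp1]
          simp only [Bool.or_eq_false_iff, beq_eq_false_iff_ne, ne_eq]
          exact ⟨⟨⟨⟨⟨⟨a1, a2⟩, a3⟩, a4⟩, a5⟩, a6⟩, a7⟩
        have hfail : (pvT1 seq.toList (seq.toList.length - 1)
            && pvT2 seq.toList (seq.toList.length - 1)) = false := by
          rw [hT1]; rfl
        rw [hmm, List.range_succ, List.filter_append,
            pv_filter_singleton_false (P := fun k => pvT1 seq.toList k && pvT2 seq.toList k)
              (a := seq.toList.length - 1) hfail, List.append_nil]
        apply congrArg
        apply List.filter_congr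
        intro k hk
        have hk' : k < seq.toList.length - 1 := List.mem_range.mp hk
        have := (pv_pred_eq seq.toList seq.toList.length k (le_refl _) (by omega)).symm
        rwa [List.take_length] at this
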